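-- pv_equiv track=rewrite | github.com/ZhongkuiMa/torchvnnlib | torchvnnlib/ast/_preprocess.py | _remove_declare_clauses
-- ===== SOURCE A (Python) =====
-- def _remove_declare_clauses(lines: list[str]) -> tuple[list[str], int, int]:
--     """
--     Removes all lines that declare variables in the VNNLIB file.
--     These lines start with `declare-const` and are not needed for parsing expressions.
--
--     :param lines: A list of lines from a VNNLIB file.
--     :return: A list of lines without the declare clauses.
--     """
--     new_lines = []
--     n_inputs = 0
--     n_outputs = 0
--
--     for line in lines:
--         if "declare-const" not in line:
--             new_lines.append(line)
--         elif "X" in line: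
--             # Count the number of inputs
--             n_inputs += 1
--         elif "Y" in line:
--             # Count the number of outputs
--             n_outputs += 1
--
--     return new_lines, n_inputs, n_outputs
-- ===== SOURCE B (Python) =====
-- def _classify(line: str) -> str:
--     """Map a line to its category tag; the if-chain encodes the elif precedence."""
--     if "declare-const" not in line:
--         return "K"  # keep
--     if "X" in line:
--         return "X"  # input declaration
--     if "Y" in line:
--         return "Y"  # output declaration
--     return "D"  # discarded declare line
--
-- def _remove_declare_clauses(lines: list[str]) -> tuple[list[str], int, int]:
--     tags = [_classify(line) for line in lines]
--     new_lines = [line for line, tag in zip(lines, tags) if tag == "K"]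
--     return new_lines, tags.count("X"), tags.count("Y")
-- ===== Notes on version B (the rewrite author's own statement) =====
-- stated objective: alternative
-- what changed: Replaces the stateful branching loop with a classification pass: each line is first mapped to a category tag (K/X/Y/D) by a total classifier, and the result is then assembled from the tag list (kept lines via zip with tags, counts via tags.count on the tags rather than by re-testing lines).
import Mathlib
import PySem

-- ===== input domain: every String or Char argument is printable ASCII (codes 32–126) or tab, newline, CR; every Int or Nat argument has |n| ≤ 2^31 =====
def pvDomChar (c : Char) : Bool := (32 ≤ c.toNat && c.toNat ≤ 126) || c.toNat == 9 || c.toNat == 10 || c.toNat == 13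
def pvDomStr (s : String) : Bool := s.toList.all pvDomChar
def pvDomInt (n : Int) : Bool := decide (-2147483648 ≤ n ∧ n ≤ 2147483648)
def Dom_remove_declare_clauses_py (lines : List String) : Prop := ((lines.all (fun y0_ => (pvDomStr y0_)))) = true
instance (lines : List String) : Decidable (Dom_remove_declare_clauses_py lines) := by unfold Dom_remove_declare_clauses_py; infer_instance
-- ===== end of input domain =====

-- ===== PORT A =====
-- B replaces A's stateful branching loop by a classification pass (line → tag) plus assembly from the tag list; objective: alternative
def rdcA_step (st : List String × Int × Int) (line : String) : List String × Int × Int :=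
  if ¬ (PySem.Str.isIn "declare-const" line) then (st.1 ++ [line], st.2.1, st.2.2)
  else if PySem.Str.isIn "X" line then (st.1, st.2.1 + 1, st.2.2)
  else if PySem.Str.isIn "Y" line then (st.1, st.2.1, st.2.2 + 1)
  else st

def remove_declare_clauses_py (lines : List String) : List String × Int × Int :=
  lines.foldl rdcA_step ([], 0, 0)

-- ===== PORT B =====
def rdc_classify (line : String) : String :=
  if ¬ (PySem.Str.isIn "declare-const" line) then "K"
  else if PySem.Str.isIn "X" line then "X"
  else if PySem.Str.isIn "Y" line then "Y"
  else "D"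

def remove_declare_clauses_py_alt (lines : List String) : List String × Int × Int :=
  let tags := lines.map rdc_classify
  (((lines.zip tags).filter (fun p => p.2 == "K")).map Prod.fst,
   (PySem.List.count tags "X" : Int),
   (PySem.List.count tags "Y" : Int))

-- ===== PRECONDITION & SPEC =====
def Spec_remove_declare_clauses_py (lines : List String) (out : List String × Int × Int) : Prop := out = remove_declare_clauses_py_alt lines
instance (lines : List String) (out : List String × Int × Int) : Decidable (Spec_remove_declare_clauses_py lines out) := by unfold Spec_remove_declare_clauses_py; infer_instance

-- ===== CLAIM (what is proved, stated in full; the proofs are below) =====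
def Claim_equal_remove_declare_clauses_py : Prop := ∀ (lines : List String), Dom_remove_declare_clauses_py lines → Spec_remove_declare_clauses_py lines (remove_declare_clauses_py lines)

-- ===== LEMMAS AND PROOFS =====
theorem rdc_foldl_eq (lines : List String) (acc : List String) (a b : Int) :
    lines.foldl rdcA_step (acc, a, b) =
      (acc ++ ((lines.zip (lines.map rdc_classify)).filter (fun p => p.2 == "K")).map Prod.fst,
       a + (PySem.List.count (lines.map rdc_classify) "X" : Int),
       b + (PySem.List.count (lines.map rdc_classify) "Y" : Int)) := by
  induction lines generalizing acc a b with
  | nil => simp [PySem.List.count]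
  | cons h t ih =>
    by_cases h1 : PySem.Str.isIn "declare-const" h = true <;>
      by_cases h2 : PySem.Str.isIn "X" h = true <;>
        by_cases h3 : PySem.Str.isIn "Y" h = true <;>
          simp_all [rdcA_step, rdc_classify, ih, PySem.List.count, List.count_cons] <;> ring

-- ===== VERDICT (by name: the statement is the Claim_ definition above) =====
theorem remove_declare_clauses_py_spec : Claim_equal_remove_declare_clauses_py := by
  intro lines _
  unfold Spec_remove_declare_clauses_py remove_declare_clauses_py remove_declare_clauses_py_alt
  rw [rdc_foldl_eq]
  simp
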